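-- pv_equiv track=rewrite | github.com/Yifan-Gao/Discern | preprocess_decision.py | merge_edus
-- ===== SOURCE A (Python) =====
-- def merge_edus(edus):
--     # v2. merge edu with its beforehand one except
--     # 1) this edu is not starting with 'if', 'and', 'or', 'to', 'unless', or
--     # 2) its beforehand edu is end with ',', '.', ':'
--     special_toks = ['if ', 'and ', 'or ', 'to ', 'unless ', 'but ', 'as ', 'except ']
--     special_puncts = ['.', ':', ',',]
--     spt_idx = []
--     for idx, edu in enumerate(edus):
--         if idx == 0:
--             continue
--         is_endwith = False
--         for special_punct in special_puncts:
--             if edus[idx-1].strip().endswith(special_punct):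
--                 is_endwith = True
--         is_startwith = False
--         for special_tok in special_toks:
--             if edu.startswith(special_tok):
--                 is_startwith = True
--         if (not is_endwith) and (not is_startwith):
--             spt_idx.append(idx)
--     edus_spt = []
--     for idx, edu in enumerate(edus):
--         if idx not in spt_idx or idx == 0:
--             edus_spt.append(edu)
--         else:
--             edus_spt[-1] += ' ' + edu
--     return edus_spt
-- ===== SOURCE B (Python) =====
-- def merge_edus(edus):
--     # single pass: decide merge-vs-append on the fly instead of building an index table first
--     special_toks = ['if ', 'and ', 'or ', 'to ', 'unless ', 'but ', 'as ', 'except ']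
--     special_puncts = ['.', ':', ',']
--     result = []
--     for idx, edu in enumerate(edus):
--         if idx == 0:
--             result.append(edu)
--         else:
--             merge = (not any(edus[idx - 1].strip().endswith(p) for p in special_puncts)) \
--                 and (not any(edu.startswith(t) for t in special_toks))
--             if merge:
--                 result[-1] += ' ' + edu
--             else:
--                 result.append(edu)
--     return result
-- ===== Notes on version B (the rewrite author's own statement) =====
-- stated objective: simpler
-- what changed: B makes the merge/append decision inline during a single pass over the list, eliminating A's first loop that builds the spt_idx index table and the 'idx not in spt_idx' membership scan in the second loop.
import Mathlib
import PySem

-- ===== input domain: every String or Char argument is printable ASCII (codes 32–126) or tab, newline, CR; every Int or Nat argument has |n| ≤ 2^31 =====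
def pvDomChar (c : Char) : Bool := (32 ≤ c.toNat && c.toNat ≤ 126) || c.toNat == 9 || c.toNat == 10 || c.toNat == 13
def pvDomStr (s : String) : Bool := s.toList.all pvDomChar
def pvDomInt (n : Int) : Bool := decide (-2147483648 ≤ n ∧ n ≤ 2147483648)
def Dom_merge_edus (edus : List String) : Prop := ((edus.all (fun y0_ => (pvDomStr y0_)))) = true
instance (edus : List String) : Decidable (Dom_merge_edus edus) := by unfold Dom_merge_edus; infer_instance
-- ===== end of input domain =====

-- B is a simpler single-pass decomposition: it decides merge-vs-append inline instead of
-- building A's spt_idx table first and scanning it in a second loop. Equivalence of the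
-- return values is proved (neither program mutates its argument).

-- ===== PORT A =====
def pvToks : List String := ["if ", "and ", "or ", "to ", "unless ", "but ", "as ", "except "]
def pvPuncts : List String := [".", ":", ","]

def merge_edus (edus : List String) : List String :=
  -- first loop: build spt_idx
  let spt_idx : List Int :=
    (PySem.List.enumerate edus).foldl (fun acc p =>
      if p.1 == 0 then acc
      else
        let is_endwith := pvPuncts.foldl (fun b sp =>
          if PySem.Str.endswith (PySem.Str.strip ((PySem.List.pyGet? edus (p.1 - 1)).getD "")) sp
          then true else b) false
        let is_startwith := pvToks.foldl (fun b st =>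
          if PySem.Str.startswith p.2 st then true else b) false
        if (!is_endwith) && (!is_startwith) then acc ++ [p.1] else acc) []
  -- second loop: split/merge according to spt_idx  (edus_spt[-1] += ' ' + edu ported via
  -- dropLast/getLast?; the list is provably nonempty whenever that branch runs, as in Python)
  (PySem.List.enumerate edus).foldl (fun out p =>
    if ¬ (p.1 ∈ spt_idx) ∨ p.1 == 0 then out ++ [p.2]
    else out.dropLast ++ [(out.getLast?.getD "") ++ " " ++ p.2]) []

-- ===== PORT B =====
def merge_edus_alt (edus : List String) : List String :=
  (PySem.List.enumerate edus).foldl (fun out p =>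
    if p.1 == 0 then out ++ [p.2]
    else
      let merge :=
        (!(pvPuncts.any (fun sp =>
            PySem.Str.endswith (PySem.Str.strip ((PySem.List.pyGet? edus (p.1 - 1)).getD "")) sp))) &&
        (!(pvToks.any (fun st => PySem.Str.startswith p.2 st)))
      if merge then out.dropLast ++ [(out.getLast?.getD "") ++ " " ++ p.2]
      else out ++ [p.2]) []

-- ===== PRECONDITION & SPEC =====
def Spec_merge_edus (edus : List String) (out : List String) : Prop := out = merge_edus_alt edus
instance (edus : List String) (out : List String) : Decidable (Spec_merge_edus edus out) := by unfold Spec_merge_edus; infer_instance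

-- ===== CLAIM (what is proved, stated in full; the proofs are below) =====
def Claim_equal_merge_edus : Prop := ∀ (edus : List String), Dom_merge_edus edus → Spec_merge_edus edus (merge_edus edus)

-- ===== LEMMAS AND PROOFS =====

-- the shared merge condition, as a function of the index and the element
def pvCond (edus : List String) (i : Int) (e : String) : Bool :=
  (!(pvPuncts.any (fun sp =>
      PySem.Str.endswith (PySem.Str.strip ((PySem.List.pyGet? edus (i - 1)).getD "")) sp))) &&
  (!(pvToks.any (fun st => PySem.Str.startswith e st)))

-- A's first loop builds exactly the indices whose enumeration pair satisfies the merge condition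
theorem pv_spt_eq (edus : List String) :
    (PySem.List.enumerate edus).foldl (fun acc p =>
      if p.1 == 0 then acc
      else
        let is_endwith := pvPuncts.foldl (fun b sp =>
          if PySem.Str.endswith (PySem.Str.strip ((PySem.List.pyGet? edus (p.1 - 1)).getD "")) sp
          then true else b) false
        let is_startwith := pvToks.foldl (fun b st =>
          if PySem.Str.startswith p.2 st then true else b) false
        if (!is_endwith) && (!is_startwith) then acc ++ [p.1] else acc) []
    = ((PySem.List.enumerate edus).filter
        (fun p => p.1 != 0 && pvCond edus p.1 p.2)).map (·.1) := by
  have hf : (fun (acc : List Int) (p : Int × String) =>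
      if p.1 == 0 then acc
      else
        let is_endwith := pvPuncts.foldl (fun b sp =>
          if PySem.Str.endswith (PySem.Str.strip ((PySem.List.pyGet? edus (p.1 - 1)).getD "")) sp
          then true else b) false
        let is_startwith := pvToks.foldl (fun b st =>
          if PySem.Str.startswith p.2 st then true else b) false
        if (!is_endwith) && (!is_startwith) then acc ++ [p.1] else acc)
      = (fun (acc : List Int) (p : Int × String) =>
          if (p.1 != 0 && pvCond edus p.1 p.2) then acc ++ [p.1] else acc) := by
    funext acc p
    simp only [PySem.List.foldl_if_true_eq, Bool.false_or, pvCond]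
    by_cases h0 : p.1 = 0
    · simp [h0]
    · simp [h0]
  rw [hf, PySem.List.foldl_append_if]
  simp

-- membership in the index table, for a pair coming from the enumeration
theorem pv_mem_spt (edus : List String) (p : Int × String)
    (hp : p ∈ PySem.List.enumerate edus) :
    (p.1 ∈ ((PySem.List.enumerate edus).filter
        (fun q => q.1 != 0 && pvCond edus q.1 q.2)).map (·.1))
      ↔ (p.1 ≠ 0 ∧ pvCond edus p.1 p.2 = true) := by
  constructor
  · intro h
    rcases List.mem_map.mp h with ⟨q, hq, hq1⟩
    rcases List.mem_filter.mp hq with ⟨hqmem, hqP⟩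
    rcases (PySem.List.mem_enumerate_iff _ _ _).mp hqmem with ⟨k, hk, rfl⟩
    rcases (PySem.List.mem_enumerate_iff _ _ _).mp hp with ⟨k', hk', rfl⟩
    simp only at hq1
    have hkk : k = k' := by omega
    subst hkk
    simp only [Bool.and_eq_true, bne_iff_ne, ne_eq] at hqP
    exact ⟨hqP.1, hqP.2⟩
  · rintro ⟨h0, hc⟩
    exact List.mem_map.mpr ⟨p, List.mem_filter.mpr ⟨hp, by
      simp only [Bool.and_eq_true, bne_iff_ne, ne_eq]; exact ⟨h0, hc⟩⟩, rfl⟩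

-- ===== VERDICT (by name: the statement is the Claim_ definition above) =====
theorem merge_edus_spec : Claim_equal_merge_edus := by
  intro edus _
  unfold Spec_merge_edus
  simp only [merge_edus, merge_edus_alt, pv_spt_eq]
  apply PySem.List.foldl_congr_mem
  intro acc p hp
  by_cases h0 : p.1 = 0
  · simp [h0]
  · have hm := pv_mem_spt edus p hp
    by_cases hc : pvCond edus p.1 p.2 = true
    · have hmem : p.1 ∈ ((PySem.List.enumerate edus).filter
          (fun q => q.1 != 0 && pvCond edus q.1 q.2)).map (·.1) := hm.mpr ⟨h0, hc⟩
      simp [h0, hmem]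
      simpa [pvCond] using hc
    · have hmem : ¬ p.1 ∈ ((PySem.List.enumerate edus).filter
          (fun q => q.1 != 0 && pvCond edus q.1 q.2)).map (·.1) := fun h => hc (hm.mp h).2
      simp only [pvCond, Bool.and_eq_true, Bool.not_eq_true'] at hc
      simp [h0, hmem]
      intro h1 h2
      exact absurd ⟨by simpa using h1, by simpa using h2⟩ hc
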